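-- pv_equiv track=rewrite | github.com/b-zhu524/usaco_practice | jan_22_bronze/p2/dice.py | solve
-- ===== SOURCE A (Python) =====
-- def beat(a, b):
--     a_vict = 0
--     b_vict = 0
--     tie = 0
--     for num1 in a:
--         for num2 in b:
--             if num1 > num2:
--                 a_vict += 1
--             elif num1 == num2:
--                 tie += 1
--             else:
--                 b_vict += 1
--     if a_vict > b_vict:
--         return 1
--     if a_vict == b_vict:
--         return 0
--     return -1
--
-- def solve(a, b):
--     a_beat_b = beat(a, b)
--     # a beat b
--     if a_beat_b == 1:
--         for n1 in range(1, 11):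
--             for n2 in range(1, 11):
--                 for n3 in range(1, 11):
--                     for n4 in range(1, 11):
--                         c = [n1, n2, n3, n4]
--                         if beat(c, a) == 1 and beat(b, c) == 1:
--                             return True
--         return False
--
--     elif a_beat_b == -1:
--         for n1 in range(1, 11):
--             for n2 in range(1, 11):
--                 for n3 in range(1, 11):
--                     for n4 in range(1, 11):
--                         c = [n1, n2, n3, n4]
--                         if beat(c, b) == 1 and beat(a, c) == 1:
--                             return True
--         return False
-- ===== SOURCE B (Python) =====
-- def solve(a, b):
--     # Net score of a vs b: (#wins of a) - (#wins of b) over all face pairs.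
--     diff = sum(sum((x > y) - (x < y) for y in b) for x in a)
--     if diff == 0:
--         return None
--     winner, loser = (a, b) if diff > 0 else (b, a)
--     # net*[v] = sum of sign(v - f) over the faces f of that die, for v in 0..10;
--     # c beats winner  iff  sum(netw[vi] for vi in c) > 0,
--     # loser beats c   iff  sum(netl[vi] for vi in c) < 0.
--     netw = [sum((v > f) - (v < f) for f in winner) for v in range(11)]
--     netl = [sum((v > f) - (v < f) for f in loser) for v in range(11)]
--     for n1 in range(1, 11):
--         for n2 in range(1, 11):
--             for n3 in range(1, 11):
--                 for n4 in range(1, 11):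
--                     if (netw[n1] + netw[n2] + netw[n3] + netw[n4] > 0
--                             and netl[n1] + netl[n2] + netl[n3] + netl[n4] < 0):
--                         return True
--     return False
-- ===== Notes on version B (the rewrite author's own statement) =====
-- stated objective: faster
-- what changed: Instead of calling the pairwise beat() scan twice for each of the 10^4 candidate dice, B computes the a-vs-b net score once and precomputes two 11-entry net-score tables over the face values 0..10, so each candidate die is judged by two 4-term table sums (c beats the winner iff its winner-table sum is > 0, the loser beats c iff its loser-table sum is < 0).
import Mathlib
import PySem

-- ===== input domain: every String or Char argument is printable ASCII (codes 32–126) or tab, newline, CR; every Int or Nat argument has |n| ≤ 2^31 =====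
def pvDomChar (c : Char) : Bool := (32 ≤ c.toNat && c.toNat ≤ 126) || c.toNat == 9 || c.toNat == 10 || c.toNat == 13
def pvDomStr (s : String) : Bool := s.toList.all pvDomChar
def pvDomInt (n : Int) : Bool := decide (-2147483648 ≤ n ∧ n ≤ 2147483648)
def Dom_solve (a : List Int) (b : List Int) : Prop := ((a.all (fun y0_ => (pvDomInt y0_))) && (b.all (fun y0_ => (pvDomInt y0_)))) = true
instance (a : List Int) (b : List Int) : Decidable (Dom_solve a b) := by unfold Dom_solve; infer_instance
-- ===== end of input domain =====

-- B replaces the repeated pairwise beat(…) scans of the 10^4 candidate dice by two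
-- precomputed value tables over 0..10, so each candidate is judged by two 4-term sums.

-- ===== PORT A =====
-- one inner-loop step of beat: state is (a_vict, b_vict, tie)
def beatStep (n1 : Int) (st : Int × Int × Int) (n2 : Int) : Int × Int × Int :=
  if n1 > n2 then (st.1 + 1, st.2.1, st.2.2)
  else if n1 = n2 then (st.1, st.2.1, st.2.2 + 1)
  else (st.1, st.2.1 + 1, st.2.2)

def beatCount (a b : List Int) : Int × Int × Int :=
  a.foldl (fun st n1 => b.foldl (beatStep n1) st) (0, 0, 0)

def beat (a b : List Int) : Int :=
  if (beatCount a b).1 > (beatCount a b).2.1 then 1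
  else if (beatCount a b).1 = (beatCount a b).2.1 then 0
  else -1

-- the quadruple loop with early `return True`, as an existence scan (`x` beaten by c, `y` beating c)
def searchA (x y : List Int) : Bool :=
  (PySem.List.pyRange 1 11 1).any fun n1 =>
    (PySem.List.pyRange 1 11 1).any fun n2 =>
      (PySem.List.pyRange 1 11 1).any fun n3 =>
        (PySem.List.pyRange 1 11 1).any fun n4 =>
          beat [n1, n2, n3, n4] x == 1 && beat y [n1, n2, n3, n4] == 1

def solve (a : List Int) (b : List Int) : Option Bool :=
  if beat a b = 1 then some (searchA a b)
  else if beat a b = -1 then some (searchA b a)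
  else none        -- Python falls through and returns None

-- ===== PORT B =====
-- sum((v > f) - (v < f) for f in x)
def netRow (x : List Int) (v : Int) : Int :=
  (x.map fun f => (if v > f then (1 : Int) else 0) - (if v < f then 1 else 0)).sum

-- [sum((v > f) - (v < f) for f in x) for v in range(11)]
def netTable (x : List Int) : List Int :=
  (PySem.List.pyRange 0 11 1).map (netRow x)

def searchB (netw netl : List Int) : Bool :=
  (PySem.List.pyRange 1 11 1).any fun n1 =>
    (PySem.List.pyRange 1 11 1).any fun n2 =>
      (PySem.List.pyRange 1 11 1).any fun n3 =>
        (PySem.List.pyRange 1 11 1).any fun n4 =>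
          decide (0 < PySem.List.pyGetD netw n1 0 + PySem.List.pyGetD netw n2 0
                      + PySem.List.pyGetD netw n3 0 + PySem.List.pyGetD netw n4 0) &&
          decide (PySem.List.pyGetD netl n1 0 + PySem.List.pyGetD netl n2 0
                      + PySem.List.pyGetD netl n3 0 + PySem.List.pyGetD netl n4 0 < 0)

def solve_alt (a : List Int) (b : List Int) : Option Bool :=
  if (a.map (netRow b)).sum = 0 then none
  else if 0 < (a.map (netRow b)).sum then some (searchB (netTable a) (netTable b))
  else some (searchB (netTable b) (netTable a))

-- ===== PRECONDITION & SPEC =====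
def Spec_solve (a : List Int) (b : List Int) (out : Option Bool) : Prop := out = solve_alt a b
instance (a : List Int) (b : List Int) (out : Option Bool) : Decidable (Spec_solve a b out) := by unfold Spec_solve; infer_instance

-- ===== CLAIM (what is proved, stated in full; the proofs are below) =====
def Claim_equal_solve : Prop := ∀ (a : List Int) (b : List Int), Dom_solve a b → Spec_solve a b (solve a b)

-- ===== LEMMAS AND PROOFS =====

def sgn (u v : Int) : Int := if u > v then 1 else if u = v then 0 else -1

def S1 (u : Int) (y : List Int) : Int := (y.map (sgn u)).sum

def S (x y : List Int) : Int := (x.map (fun u => S1 u y)).sum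

lemma sgn_swap (u v : Int) : sgn u v = - sgn v u := by
  unfold sgn; split_ifs <;> omega

lemma sum_map_neg {α : Type} (l : List α) (f : α → Int) :
    (l.map (fun u => - f u)).sum = - (l.map f).sum := by
  induction l with
  | nil => simp
  | cons x xs ih => simp [ih]; ring

lemma sum_map_add {α : Type} (l : List α) (f g : α → Int) :
    (l.map (fun u => f u + g u)).sum = (l.map f).sum + (l.map g).sum := by
  induction l with
  | nil => simp
  | cons x xs ih => simp [ih]; ring

lemma netRow_eq (x : List Int) (v : Int) : netRow x v = S1 v x := by
  unfold netRow S1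
  congr 1
  apply List.map_congr_left
  intro f _
  unfold sgn; split_ifs <;> omega

lemma inner_diff (n1 : Int) (y : List Int) : ∀ st : Int × Int × Int,
    (y.foldl (beatStep n1) st).1 - (y.foldl (beatStep n1) st).2.1
      = st.1 - st.2.1 + S1 n1 y := by
  induction y with
  | nil => intro st; simp [S1]
  | cons v ys ih =>
      intro st
      simp only [List.foldl_cons]
      rw [ih]
      have h : S1 n1 (v :: ys) = sgn n1 v + S1 n1 ys := by simp [S1]
      rw [h]
      unfold beatStep sgn
      split_ifs <;> simp <;> ring

lemma outer_diff (y x : List Int) : ∀ st : Int × Int × Int,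
    (x.foldl (fun st n1 => y.foldl (beatStep n1) st) st).1
      - (x.foldl (fun st n1 => y.foldl (beatStep n1) st) st).2.1
      = st.1 - st.2.1 + S x y := by
  induction x with
  | nil => intro st; simp [S]
  | cons u xs ih =>
      intro st
      simp only [List.foldl_cons]
      rw [ih]
      have h1 := inner_diff u y st
      have h2 : S (u :: xs) y = S1 u y + S xs y := by simp [S]
      omega

lemma beatCount_diff (x y : List Int) :
    (beatCount x y).1 - (beatCount x y).2.1 = S x y := by
  unfold beatCount
  have h := outer_diff y x (0, 0, 0)
  simp only [] at h
  simp at h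
  omega

lemma beat_char (x y : List Int) :
    beat x y = if 0 < S x y then 1 else if S x y = 0 then 0 else -1 := by
  have h := beatCount_diff x y
  unfold beat
  split_ifs <;> omega

lemma beat_eq_one (x y : List Int) : beat x y = 1 ↔ 0 < S x y := by
  rw [beat_char]; split_ifs with h1 h2
  · simp [h1]
  · constructor <;> intro <;> omega
  · simp [h1]

lemma S_swap (x y : List Int) : S y x = - S x y := by
  induction x with
  | nil =>
      simp [S, S1]
  | cons v xs ih =>
      have h1 : S y (v :: xs) = (y.map (fun u => sgn u v)).sum + S y xs := by
        unfold S
        rw [show (fun u => S1 u (v :: xs)) = fun u => sgn u v + S1 u xs from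
          funext (fun u => by simp [S1])]
        exact sum_map_add y _ _
      have h2 : (y.map (fun u => sgn u v)).sum = - S1 v y := by
        rw [show (fun u => sgn u v) = fun u => - sgn v u from funext (fun u => sgn_swap u v)]
        rw [sum_map_neg]
        rfl
      have h3 : S (v :: xs) y = S1 v y + S xs y := by simp [S]
      omega

lemma any_congr {α : Type} {l : List α} {p q : α → Bool}
    (h : ∀ x ∈ l, p x = q x) : l.any p = l.any q := by
  induction l with
  | nil => rfl
  | cons x xs ih =>
      simp only [List.any_cons, h x List.mem_cons_self,
        ih (fun y hy => h y (List.mem_cons_of_mem x hy))]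

lemma table_get (x : List Int) (n : Int) (h0 : 0 ≤ n) (h1 : n < 11) :
    PySem.List.pyGetD (netTable x) n 0 = netRow x n := by
  unfold netTable
  exact PySem.List.pyGetD_map_pyRange_of_nonneg (netRow x) 11 n 0 h0 h1

lemma search_eq (x y : List Int) : searchA x y = searchB (netTable x) (netTable y) := by
  unfold searchA searchB
  apply any_congr; intro n1 h1
  apply any_congr; intro n2 h2
  apply any_congr; intro n3 h3
  apply any_congr; intro n4 h4
  rw [PySem.List.mem_pyRange_one] at h1 h2 h3 h4
  rw [table_get x n1 (by omega) (by omega), table_get x n2 (by omega) (by omega),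
      table_get x n3 (by omega) (by omega), table_get x n4 (by omega) (by omega),
      table_get y n1 (by omega) (by omega), table_get y n2 (by omega) (by omega),
      table_get y n3 (by omega) (by omega), table_get y n4 (by omega) (by omega)]
  rw [Bool.eq_iff_iff]
  simp only [Bool.and_eq_true, beq_iff_eq, decide_eq_true_eq, netRow_eq]
  rw [beat_eq_one, beat_eq_one]
  have hc1 : S [n1, n2, n3, n4] x = S1 n1 x + S1 n2 x + S1 n3 x + S1 n4 x := by
    simp [S]; ring
  have hc2 : S [n1, n2, n3, n4] y = S1 n1 y + S1 n2 y + S1 n3 y + S1 n4 y := by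
    simp [S]; ring
  have hsw : S y [n1, n2, n3, n4] = - S [n1, n2, n3, n4] y := S_swap _ _
  omega

lemma diff_eq (a b : List Int) : (a.map (netRow b)).sum = S a b := by
  unfold S
  congr 1
  exact List.map_congr_left (fun u _ => netRow_eq b u)

-- ===== VERDICT (by name: the statement is the Claim_ definition above) =====
theorem solve_spec : Claim_equal_solve := by
  intro a b _
  unfold Spec_solve
  show solve a b = solve_alt a b
  unfold solve solve_alt
  rw [diff_eq, beat_char]
  rcases lt_trichotomy (S a b) 0 with h | h | h
  · have hv : (if 0 < S a b then (1:Int) else if S a b = 0 then 0 else -1) = -1 := by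
      rw [if_neg (by omega), if_neg (by omega)]
    rw [hv, if_neg (by decide), if_pos rfl, if_neg (by omega), if_neg (by omega)]
    exact congrArg some (search_eq b a)
  · simp [h]
  · have hv : (if 0 < S a b then (1:Int) else if S a b = 0 then 0 else -1) = 1 := by
      rw [if_pos h]
    rw [hv, if_pos rfl, if_neg (by omega), if_pos h]
    exact congrArg some (search_eq a b)
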